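-- pv_equiv track=rewrite | github.com/ewanmer20/DisplacedMolecularDocking | DisplacedGBS_4uxb/Plot_threefold statistics.py | generate_threefoldstatistics
-- ===== SOURCE A (Python) =====
-- def generate_threefoldstatistics(numodes ,truncation):
--     """
--
--     :param numodes: number of modes of the GBS experiment
--     :param truncation: truncation of the Hilbert space for each mode
--     :return:
--     """
--     array_index =[]
--     for i in range(numodes):
--         for j in range(numodes):
--             for k in range(numodes):
--                 if i<= j <= k and i<truncation and j<truncation and k<truncation:
--                     array_index.append([i, j, k])
--     return array_index
-- ===== SOURCE B (Python) =====
-- def _cwr1(xs):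
--     return [[x] for x in xs]
--
-- def _cwr2(xs):
--     # pairs (xs[i], xs[j]) with i <= j, lexicographic, via suffix enumeration
--     out = []
--     for idx in range(len(xs)):
--         for p in _cwr1(xs[idx:]):
--             out.append([xs[idx]] + p)
--     return out
--
-- def _cwr3(xs):
--     # non-decreasing triples over xs, lexicographic, via suffix enumeration
--     out = []
--     for idx in range(len(xs)):
--         for p in _cwr2(xs[idx:]):
--             out.append([xs[idx]] + p)
--     return out
--
-- def generate_threefoldstatistics(numodes, truncation):
--     bound = min(numodes, truncation)
--     return _cwr3(list(range(bound)))
-- ===== Notes on version B (the rewrite author's own statement) =====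
-- stated objective: alternative
-- what changed: Replaces the triple nested loop over range(numodes) with a post-filter by a direct suffix-recursive enumeration of non-decreasing triples over range(min(numodes,truncation)), generating exactly the kept triples in the same lexicographic order.
import Mathlib
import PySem

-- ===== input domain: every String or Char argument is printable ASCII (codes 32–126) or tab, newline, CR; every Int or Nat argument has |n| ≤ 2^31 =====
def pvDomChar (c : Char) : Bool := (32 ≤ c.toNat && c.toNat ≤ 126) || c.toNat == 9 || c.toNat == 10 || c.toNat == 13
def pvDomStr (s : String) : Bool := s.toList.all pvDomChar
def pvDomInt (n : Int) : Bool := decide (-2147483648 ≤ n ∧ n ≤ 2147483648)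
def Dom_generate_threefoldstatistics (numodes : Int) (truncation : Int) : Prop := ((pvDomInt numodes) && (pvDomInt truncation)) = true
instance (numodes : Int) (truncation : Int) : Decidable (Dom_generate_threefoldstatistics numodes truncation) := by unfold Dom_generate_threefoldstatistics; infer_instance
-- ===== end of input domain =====

-- B replaces A's triple nested scan over range(numodes) with a filter by a direct
-- suffix-recursive enumeration of the non-decreasing triples over range(min(numodes,truncation)),
-- emitting exactly the kept triples in the same lexicographic order (objective: alternative).

-- ===== PORT A =====
def generate_threefoldstatistics (numodes : Int) (truncation : Int) : List (List Int) :=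
  (PySem.List.pyRange 0 numodes 1).foldl (fun acc i =>
    (PySem.List.pyRange 0 numodes 1).foldl (fun acc j =>
      (PySem.List.pyRange 0 numodes 1).foldl (fun acc k =>
        if i ≤ j ∧ j ≤ k ∧ i < truncation ∧ j < truncation ∧ k < truncation
        then acc ++ [[i, j, k]] else acc) acc) acc) []

-- ===== PORT B =====
-- _cwr1(xs) = [[x] for x in xs]
def pvCwr1 (xs : List Int) : List (List Int) := xs.map (fun x => [x])

-- _cwr2: the Python loop 'for idx in range(len(xs))' walks exactly the suffixes xs[idx:];
-- ported as structural recursion on those suffixes.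
def pvCwr2 : List Int → List (List Int)
  | [] => []
  | x :: rest => (pvCwr1 (x :: rest)).map (fun p => x :: p) ++ pvCwr2 rest

-- _cwr3: the same suffix walk, one level up.
def pvCwr3 : List Int → List (List Int)
  | [] => []
  | x :: rest => (pvCwr2 (x :: rest)).map (fun p => x :: p) ++ pvCwr3 rest

def generate_threefoldstatistics_alt (numodes : Int) (truncation : Int) : List (List Int) :=
  pvCwr3 (PySem.List.pyRange 0 (min numodes truncation) 1)

-- ===== PRECONDITION & SPEC =====
def Spec_generate_threefoldstatistics (numodes : Int) (truncation : Int) (out : List (List Int)) : Prop := out = generate_threefoldstatistics_alt numodes truncation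
instance (numodes : Int) (truncation : Int) (out : List (List Int)) : Decidable (Spec_generate_threefoldstatistics numodes truncation out) := by unfold Spec_generate_threefoldstatistics; infer_instance

-- ===== CLAIM (what is proved, stated in full; the proofs are below) =====
def Claim_equal_generate_threefoldstatistics : Prop := ∀ (numodes : Int) (truncation : Int), Dom_generate_threefoldstatistics numodes truncation → Spec_generate_threefoldstatistics numodes truncation (generate_threefoldstatistics numodes truncation)

-- ===== LEMMAS AND PROOFS =====

-- congruence of flatMap on members
theorem pvFlatMapCongr {α β : Type} {l : List α} {f g : α → List β}
    (h : ∀ x ∈ l, f x = g x) : l.flatMap f = l.flatMap g := by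
  induction l with
  | nil => rfl
  | cons a l ih =>
    rw [List.flatMap_cons, List.flatMap_cons, h a List.mem_cons_self,
      ih (fun x hx => h x (List.mem_cons_of_mem a hx))]

-- a flatMap of singletons is a map
theorem pvFlatMapSingleton {α β : Type} (l : List α) (f : α → β) :
    l.flatMap (fun x => [f x]) = l.map f := by
  induction l with
  | nil => rfl
  | cons a l ih => rw [List.flatMap_cons, ih]; rfl

-- a fold that conditionally appends one element is a flatMap of conditional singletons
theorem pvFoldlIf {α β : Type} (P : α → Prop) [DecidablePred P] (f : α → β)
    (l : List α) (acc : List β) :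
      l.foldl (fun a x => if P x then a ++ [f x] else a) acc
        = acc ++ l.flatMap (fun x => if P x then [f x] else []) := by
  induction l generalizing acc with
  | nil => simp
  | cons a l ih =>
    rw [List.foldl_cons, List.flatMap_cons, ih]
    split_ifs <;> simp

-- shrinking a flatMap over range(n) to range(min n t) when the body dies at and above t
theorem pvRestrict {β : Type} (n t : Int) (g : Int → List β)
    (hg : ∀ x, t ≤ x → g x = []) :
    (PySem.List.pyRange 0 n 1).flatMap g = (PySem.List.pyRange 0 (min n t) 1).flatMap g := by
  by_cases h : n ≤ t
  · rw [min_eq_left h]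
  · by_cases h0 : 0 ≤ t
    · rw [min_eq_right (show t ≤ n by omega),
        PySem.List.pyRange_one_append 0 t n h0 (show t ≤ n by omega),
        List.flatMap_append]
      have h2 : (PySem.List.pyRange t n 1).flatMap g = [] := by
        rw [List.flatMap_eq_nil_iff]
        intro x hx
        exact hg x (PySem.List.mem_pyRange_one.mp hx).1
      rw [h2, List.append_nil]
    · rw [min_eq_right (show t ≤ n by omega),
        PySem.List.pyRange_one_eq_nil (show t ≤ (0 : Int) by omega)]
      have h2 : (PySem.List.pyRange 0 n 1).flatMap g = [] := by
        rw [List.flatMap_eq_nil_iff]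
        intro x hx
        exact hg x (by have := (PySem.List.mem_pyRange_one.mp hx).1; omega)
      rw [h2]; rfl

-- canonical flatMap forms of A's nested loops (after stripping the truncation tests)
def pvA2 (L : List Int) : List (List Int) :=
  L.flatMap (fun j => L.flatMap (fun k => if j ≤ k then [[j, k]] else []))

def pvA3 (L : List Int) : List (List Int) :=
  L.flatMap (fun i => L.flatMap (fun j => L.flatMap (fun k =>
    if i ≤ j ∧ j ≤ k then [[i, j, k]] else [])))

theorem pvA2_eq (L : List Int) (h : L.Pairwise (· < ·)) : pvA2 L = pvCwr2 L := by
  induction L with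
  | nil => rfl
  | cons x xs ih =>
    obtain ⟨hx, hxs⟩ := List.pairwise_cons.mp h
    have head : (x :: xs).flatMap (fun k => if x ≤ k then [[x, k]] else [])
        = (pvCwr1 (x :: xs)).map (fun p => x :: p) := by
      rw [pvFlatMapCongr (g := fun k => [[x, k]]) (by
        intro k hk
        rcases List.mem_cons.mp hk with rfl | hk
        · rw [if_pos le_rfl]
        · rw [if_pos (le_of_lt (hx k hk))]),
        pvFlatMapSingleton]
      unfold pvCwr1
      rw [List.map_map]
      rfl
    have tail : xs.flatMap (fun j => (x :: xs).flatMap (fun k => if j ≤ k then [[j, k]] else []))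
        = pvCwr2 xs := by
      rw [pvFlatMapCongr (g := fun j => xs.flatMap (fun k => if j ≤ k then [[j, k]] else []))
        (by
          intro j hj
          rw [List.flatMap_cons, if_neg (fun hle => absurd (hx j hj) (not_lt.mpr hle)),
            List.nil_append])]
      exact ih hxs
    unfold pvA2
    rw [List.flatMap_cons, head, tail]
    simp only [pvCwr2]

theorem pvA3_eq (L : List Int) (h : L.Pairwise (· < ·)) : pvA3 L = pvCwr3 L := by
  induction L with
  | nil => rfl
  | cons x xs ih =>
    obtain ⟨hx, hxs⟩ := List.pairwise_cons.mp h
    have head : (x :: xs).flatMap (fun j => (x :: xs).flatMap (fun k =>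
          if x ≤ j ∧ j ≤ k then [[x, j, k]] else []))
        = (pvCwr2 (x :: xs)).map (fun p => x :: p) := by
      rw [← pvA2_eq (x :: xs) h]
      unfold pvA2
      rw [List.map_flatMap]
      apply pvFlatMapCongr
      intro j hj
      have hxj : x ≤ j := by
        rcases List.mem_cons.mp hj with rfl | hj
        · exact le_rfl
        · exact le_of_lt (hx j hj)
      rw [List.map_flatMap]
      apply pvFlatMapCongr
      intro k _
      by_cases hjk : j ≤ k
      · rw [if_pos hjk, if_pos ⟨hxj, hjk⟩]; rfl
      · rw [if_neg hjk, if_neg (fun hc => hjk hc.2)]; rfl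
    have tail : xs.flatMap (fun i => (x :: xs).flatMap (fun j => (x :: xs).flatMap (fun k =>
          if i ≤ j ∧ j ≤ k then [[i, j, k]] else [])))
        = pvCwr3 xs := by
      rw [pvFlatMapCongr (g := fun i => xs.flatMap (fun j => xs.flatMap (fun k =>
            if i ≤ j ∧ j ≤ k then [[i, j, k]] else [])))
        (by
          intro i hi
          have hxi : x < i := hx i hi
          rw [List.flatMap_cons]
          have hz : (x :: xs).flatMap (fun k => if i ≤ x ∧ x ≤ k then [[i, x, k]] else []) = [] := by
            rw [List.flatMap_eq_nil_iff]
            intro k _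
            exact if_neg (fun hc => absurd hxi (not_lt.mpr hc.1))
          rw [hz, List.nil_append]
          apply pvFlatMapCongr
          intro j hj
          rw [List.flatMap_cons,
            if_neg (fun hc => absurd (hx j hj) (not_lt.mpr hc.2)), List.nil_append])]
      exact ih hxs
    unfold pvA3
    rw [List.flatMap_cons, head, tail]
    simp only [pvCwr3]

theorem portA_canon (n t : Int) :
    generate_threefoldstatistics n t = pvA3 (PySem.List.pyRange 0 (min n t) 1) := by
  unfold generate_threefoldstatistics pvA3
  have e3 : ∀ (i j : Int) (acc : List (List Int)),
      (PySem.List.pyRange 0 n 1).foldl (fun acc k =>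
          if i ≤ j ∧ j ≤ k ∧ i < t ∧ j < t ∧ k < t then acc ++ [[i, j, k]] else acc) acc
        = acc ++ (PySem.List.pyRange 0 n 1).flatMap (fun k =>
            if i ≤ j ∧ j ≤ k ∧ i < t ∧ j < t ∧ k < t then [[i, j, k]] else []) :=
    fun i j acc => pvFoldlIf _ _ _ _
  simp only [e3, PySem.List.foldl_append_eq_flatMap, List.nil_append]
  -- restrict the outer (i) loop to range(min n t)
  rw [pvRestrict n t _ (by
    intro i hi
    rw [List.flatMap_eq_nil_iff]
    intro j _
    rw [List.flatMap_eq_nil_iff]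
    intro k _
    exact if_neg (by rintro ⟨-, -, h3, -⟩; omega))]
  -- drop 'i < t', restrict the j loop, drop 'j < t', restrict the k loop, drop 'k < t'
  apply pvFlatMapCongr
  intro i hi
  have hit : i < t := by have := PySem.List.mem_pyRange_one.mp hi; omega
  rw [pvRestrict n t _ (by
    intro j hj
    rw [List.flatMap_eq_nil_iff]
    intro k _
    exact if_neg (by rintro ⟨-, -, -, h4, -⟩; omega))]
  apply pvFlatMapCongr
  intro j hj
  have hjt : j < t := by have := PySem.List.mem_pyRange_one.mp hj; omega
  rw [pvRestrict n t _ (by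
    intro k hk
    exact if_neg (by rintro ⟨-, -, -, -, h5⟩; omega))]
  apply pvFlatMapCongr
  intro k hk
  have hkt : k < t := by have := PySem.List.mem_pyRange_one.mp hk; omega
  exact if_congr (by omega) rfl rfl

-- ===== VERDICT (by name: the statement is the Claim_ definition above) =====
theorem generate_threefoldstatistics_spec : Claim_equal_generate_threefoldstatistics := by
  intro n t _
  unfold Spec_generate_threefoldstatistics generate_threefoldstatistics_alt
  rw [portA_canon, pvA3_eq _ (PySem.List.pairwise_lt_pyRange_one 0 (min n t))]
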